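-- pv_equiv track=rewrite | github.com/khazenor/Farming-Crossing-4 | $notes/modBisect/src/modBisect.py | fileGroupsWithSubstrings
-- ===== SOURCE A (Python) =====
-- def fileGroupsWithSubstrings(modSubstrings, allFileGroups):
-- 	fileGroups = []
-- 	for modSubstring in modSubstrings:
-- 		for fileGroup in allFileGroups:
-- 			for filename in fileGroup:
-- 				if modSubstring.lower() in filename.lower():
-- 					fileGroups.append(fileGroup)
-- 					break
-- 	return fileGroups
-- ===== SOURCE B (Python) =====
-- def fileGroupsWithSubstrings(modSubstrings, allFileGroups):
--     # Lower every string once, build a per-group boolean match row in one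
--     # group-major pass, then emit in substring-major order from the table.
--     lowSubs = [s.lower() for s in modSubstrings]
--     rows = []
--     for fileGroup in allFileGroups:
--         lows = [f.lower() for f in fileGroup]
--         rows.append([any(s in f for f in lows) for s in lowSubs])
--     out = []
--     for i, _ in enumerate(lowSubs):
--         for fileGroup, row in zip(allFileGroups, rows):
--             if row[i]:
--                 out.append(fileGroup)
--     return out
-- ===== Notes on version B (the rewrite author's own statement) =====
-- stated objective: alternative
-- what changed: B lowercases every substring and filename exactly once, builds a per-group boolean match table in a single group-major pass, and then emits the result in substring-major order from the table, instead of A's triple nested loop that re-lowercases the substring and each filename on every comparison.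
import Mathlib
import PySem

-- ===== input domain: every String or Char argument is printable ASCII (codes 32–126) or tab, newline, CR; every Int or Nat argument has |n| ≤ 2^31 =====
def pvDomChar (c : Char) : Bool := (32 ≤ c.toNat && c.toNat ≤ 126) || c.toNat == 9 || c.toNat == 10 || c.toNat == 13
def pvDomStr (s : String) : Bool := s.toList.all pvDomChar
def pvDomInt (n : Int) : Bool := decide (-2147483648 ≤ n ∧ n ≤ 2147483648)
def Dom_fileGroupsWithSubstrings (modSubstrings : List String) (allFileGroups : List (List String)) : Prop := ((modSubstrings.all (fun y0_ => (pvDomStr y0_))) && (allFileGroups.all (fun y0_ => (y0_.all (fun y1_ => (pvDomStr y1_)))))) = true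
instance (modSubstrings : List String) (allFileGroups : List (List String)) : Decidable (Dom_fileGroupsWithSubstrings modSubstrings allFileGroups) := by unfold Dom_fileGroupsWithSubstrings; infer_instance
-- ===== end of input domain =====

-- B lowers each string once and builds a per-group boolean match table in a single
-- group-major pass, then emits from the table in substring-major order (alternative
-- decomposition; same output as A's triple nested loop).

-- ===== PORT A =====
-- inner 'for filename in fileGroup: if … : append; break' of A
def pvInnerGo (modSubstring : String) (fileGroup : List String)
    (acc : List (List String)) : List String → List (List String)
  | [] => acc
  | filename :: rest =>
    if PySem.Str.isIn (PySem.Str.lower modSubstring) (PySem.Str.lower filename) then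
      acc ++ [fileGroup]
    else
      pvInnerGo modSubstring fileGroup acc rest

def fileGroupsWithSubstrings (modSubstrings : List String) (allFileGroups : List (List String)) : List (List String) :=
  modSubstrings.foldl (fun acc modSubstring =>
    allFileGroups.foldl (fun acc fileGroup =>
      pvInnerGo modSubstring fileGroup acc fileGroup) acc) []

-- ===== PORT B =====
-- '[any(s in f for f in lows) for s in lowSubs]' for one group
def pvRow (lowSubs : List String) (fileGroup : List String) : List Bool :=
  let lows := fileGroup.map PySem.Str.lower
  lowSubs.map (fun s => lows.any (fun f => PySem.Str.isIn s f))

def fileGroupsWithSubstrings_alt (modSubstrings : List String) (allFileGroups : List (List String)) : List (List String) :=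
  let lowSubs := modSubstrings.map PySem.Str.lower
  let rows := allFileGroups.map (pvRow lowSubs)
  (PySem.List.enumerate lowSubs 0).foldl (fun out p =>
    (allFileGroups.zip rows).foldl (fun out gr =>
      -- row[i]: i is always in range (each row has length len(lowSubs)), so getD is exact
      if PySem.List.pyGetD gr.2 p.1 false then out ++ [gr.1] else out) out) []

-- ===== PRECONDITION & SPEC =====
def Spec_fileGroupsWithSubstrings (modSubstrings : List String) (allFileGroups : List (List String)) (out : List (List String)) : Prop := out = fileGroupsWithSubstrings_alt modSubstrings allFileGroups
instance (modSubstrings : List String) (allFileGroups : List (List String)) (out : List (List String)) : Decidable (Spec_fileGroupsWithSubstrings modSubstrings allFileGroups out) := by unfold Spec_fileGroupsWithSubstrings; infer_instance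

-- ===== CLAIM (what is proved, stated in full; the proofs are below) =====
def Claim_equal_fileGroupsWithSubstrings : Prop := ∀ (modSubstrings : List String) (allFileGroups : List (List String)), Dom_fileGroupsWithSubstrings modSubstrings allFileGroups → Spec_fileGroupsWithSubstrings modSubstrings allFileGroups (fileGroupsWithSubstrings modSubstrings allFileGroups)

-- ===== LEMMAS AND PROOFS =====

-- "group g matches substring s" (case-insensitively)
def pvMatch (s : String) (g : List String) : Bool :=
  g.any (fun f => PySem.Str.isIn (PySem.Str.lower s) (PySem.Str.lower f))

theorem pvInnerGo_eq (s : String) (g : List String) (acc : List (List String))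
    (fs : List String) :
    pvInnerGo s g acc fs =
      if fs.any (fun f => PySem.Str.isIn (PySem.Str.lower s) (PySem.Str.lower f)) then
        acc ++ [g] else acc := by
  induction fs with
  | nil => simp [pvInnerGo]
  | cons f rest ih =>
    simp only [pvInnerGo, List.any_cons, ih, Bool.or_eq_true]
    cases h : PySem.Str.isIn (PySem.Str.lower s) (PySem.Str.lower f) <;> simp

theorem portA_eq (subs : List String) (groups : List (List String)) :
    fileGroupsWithSubstrings subs groups =
      subs.flatMap (fun s => groups.filter (pvMatch s)) := by
  unfold fileGroupsWithSubstrings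
  rw [PySem.List.foldl_congr_mem' subs _
        (fun acc s => acc ++ groups.filter (pvMatch s)) []
        (by
          intro s _ acc
          rw [PySem.List.foldl_congr_mem' groups _
                (fun acc g => if pvMatch s g then acc ++ [g] else acc) acc
                (by intro g _ acc; rw [pvInnerGo_eq]; rfl),
              PySem.List.foldl_append_if_eq_filter]),
      PySem.List.foldl_append_eq_flatMap, List.nil_append]

theorem pvRow_getD (L : List String) (g : List String) (k : Nat) (hk : k < L.length) :
    PySem.List.pyGetD (pvRow L g) (k : Int) false =
      (g.map PySem.Str.lower).any (fun f => PySem.Str.isIn L[k] f) := by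
  rw [PySem.List.pyGetD_natCast]
  simp [pvRow, List.getD_eq_getElem?_getD, hk]

theorem innerB_eq (L : List String) (i : Int)
    (groups : List (List String)) (out : List (List String)) :
    (groups.zip (groups.map (pvRow L))).foldl (fun out gr =>
        if PySem.List.pyGetD gr.2 i false then out ++ [gr.1] else out) out =
      out ++ groups.filter (fun g => PySem.List.pyGetD (pvRow L g) i false) := by
  induction groups generalizing out with
  | nil => simp
  | cons g rest ih =>
    simp only [List.map_cons, List.zip_cons_cons, List.foldl_cons, List.filter_cons]
    cases h : PySem.List.pyGetD (pvRow L g) i false <;> simp [ih]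

theorem pvFlatMap_snd {α β γ : Type} (l : List (α × β)) (F : β → List γ) :
    l.flatMap (fun p => F p.2) = (l.map (fun p => p.2)).flatMap F := by
  induction l with
  | nil => rfl
  | cons x t ih => simp [ih]

theorem portB_eq (subs : List String) (groups : List (List String)) :
    fileGroupsWithSubstrings_alt subs groups =
      subs.flatMap (fun s => groups.filter (pvMatch s)) := by
  simp only [fileGroupsWithSubstrings_alt]
  rw [PySem.List.foldl_congr_mem' (PySem.List.enumerate (subs.map PySem.Str.lower) 0) _
        (fun out p => out ++ groups.filter (fun g =>
          (g.map PySem.Str.lower).any (fun f => PySem.Str.isIn p.2 f))) []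
        (by
          intro p hp out
          obtain ⟨k, hk, rfl⟩ := (PySem.List.mem_enumerate_iff _ _ _).mp hp
          rw [innerB_eq]
          congr 1
          refine List.filter_congr ?_
          intro g _
          have hk' : k < (subs.map PySem.Str.lower).length := hk
          calc PySem.List.pyGetD (pvRow (subs.map PySem.Str.lower) g) ((0 : Int) + ↑k) false
              = PySem.List.pyGetD (pvRow (subs.map PySem.Str.lower) g) (↑k) false := by
                rw [Int.zero_add]
            _ = _ := pvRow_getD _ _ _ hk'),
      PySem.List.foldl_append_eq_flatMap, List.nil_append,
      pvFlatMap_snd (F := fun s => groups.filter (fun g =>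
        (g.map PySem.Str.lower).any (fun f => PySem.Str.isIn s f))),
      PySem.List.map_snd_enumerate, List.flatMap_map]
  have h : ∀ s : String,
      groups.filter (fun g =>
        (g.map PySem.Str.lower).any (fun f => PySem.Str.isIn (PySem.Str.lower s) f)) =
      groups.filter (pvMatch s) := by
    intro s
    refine List.filter_congr fun g _ => ?_
    simp [pvMatch, List.any_map, Function.comp_def]
  simp only [h]

-- ===== VERDICT (by name: the statement is the Claim_ definition above) =====
theorem fileGroupsWithSubstrings_spec : Claim_equal_fileGroupsWithSubstrings := by
  intro subs groups _
  unfold Spec_fileGroupsWithSubstrings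
  rw [portA_eq, portB_eq]
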